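-- pv_equiv track=rewrite | github.com/1Jayakrishnan/GFG--POTD | DEC 2023 GFG/Count More than n by k Occurences.py | countOccurence
-- ===== SOURCE A (Python) =====
-- def countOccurence(arr,n,k):
--     #Your code here
--     candidates = {}
--
--     # Step 1: Find potential candidates.
--     for num in arr:
--         if num in candidates:
--             candidates[num] += 1
--         elif len(candidates) < k - 1:
--             candidates[num] = 1
--         else:
--             # Eliminate pairs of different elements.
--             for key in list(candidates.keys()):
--                 candidates[key] -= 1
--                 if candidates[key] == 0:
--                     del candidates[key]
--
--     # Step 2: Reset counts for potential candidates.
--     for key in candidates.keys():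
--         candidates[key] = 0
--
--     # Step 3: Count occurrences of potential candidates.
--     for num in arr:
--         if num in candidates:
--             candidates[num] += 1
--
--     # Step 4: Check and count elements that appear more than n/k times.
--     result = 0
--     for key in candidates.keys():
--         if candidates[key] > n // k:
--             result += 1
--
--     return result
-- ===== SOURCE B (Python) =====
-- def countOccurence(arr, n, k):
--     # Misra-Gries with a global elimination level: instead of decrementing every
--     # candidate in an inner loop, each candidate stores the level at which its
--     # implicit counter would reach zero, so an elimination is just level += 1.
--     level = 0
--     death = {}   # x -> level at which x's implicit counter hits zero (> level means alive)
--     dying = {}   # lvl -> number of live keys whose death level is lvl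
--     live = 0
--     for num in arr:
--         d = death.get(num)
--         if d is not None and d > level:
--             death[num] = d + 1
--             dying[d] = dying.get(d, 0) - 1
--             dying[d + 1] = dying.get(d + 1, 0) + 1
--         elif live < k - 1:
--             death[num] = level + 1
--             dying[level + 1] = dying.get(level + 1, 0) + 1
--             live += 1
--         else:
--             level += 1
--             live -= dying.pop(level, 0)
--     freq = {}
--     for num in arr:
--         freq[num] = freq.get(num, 0) + 1
--     return sum(1 for x, d in death.items() if d > level and freq.get(x, 0) > n // k)
-- ===== Notes on version B (the rewrite author's own statement) =====
-- stated objective: alternative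
-- what changed: The inner decrement-all-candidates loop of A's Misra-Gries pass is replaced by a global elimination level with per-level 'dying' buckets (one O(1) dict step per element, no inner loop), and A's three candidate-recount passes (reset, recount over arr, threshold scan) are replaced by one frequency dict built once plus a single comprehension over the candidates; it trades A's inner loop for more dict bookkeeping per element.
import Mathlib
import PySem

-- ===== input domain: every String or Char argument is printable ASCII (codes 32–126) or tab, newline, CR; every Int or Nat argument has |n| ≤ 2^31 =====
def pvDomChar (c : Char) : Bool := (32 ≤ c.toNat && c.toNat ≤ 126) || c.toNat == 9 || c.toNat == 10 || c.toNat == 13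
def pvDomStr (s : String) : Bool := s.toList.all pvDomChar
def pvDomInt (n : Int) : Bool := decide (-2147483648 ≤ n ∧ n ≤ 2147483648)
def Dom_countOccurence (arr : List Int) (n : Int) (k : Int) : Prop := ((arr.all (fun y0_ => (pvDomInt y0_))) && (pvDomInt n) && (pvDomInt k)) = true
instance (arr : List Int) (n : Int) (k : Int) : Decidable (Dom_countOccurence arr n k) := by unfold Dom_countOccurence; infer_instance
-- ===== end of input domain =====

-- B replaces A's inner decrement-all-candidates loop by a global elimination level with
-- per-level death buckets, and A's three recount passes by one frequency dict; objective:
-- alternative (a different data structure for the same task).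

-- ===== PORT A =====
-- inner loop of A's else branch: candidates[key] -= 1; delete when it reaches 0
def pvElimStep (d : PySem.Dict Int Int) (key : Int) : PySem.Dict Int Int :=
  let d1 := d.insert key (d.getD key 0 - 1)
  if d1.getD key 0 == 0 then d1.erase key else d1

-- one iteration of A's step-1 loop over arr
def pvStepA (k : Int) (c : PySem.Dict Int Int) (num : Int) : PySem.Dict Int Int :=
  if c.contains num then c.insert num (c.getD num 0 + 1)
  else if (c.size : Int) < k - 1 then c.insert num 1
  else c.keys.foldl pvElimStep c

def countOccurence (arr : List Int) (n : Int) (k : Int) : Int :=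
  let c1 := arr.foldl (pvStepA k) PySem.Dict.empty
  let c2 := c1.keys.foldl (fun d key => d.insert key 0) c1
  let c3 := arr.foldl (fun d num => if d.contains num then d.insert num (d.getD num 0 + 1) else d) c2
  c3.keys.foldl (fun r key => if c3.getD key 0 > PySem.Int.floordiv n k then r + 1 else r) 0

-- ===== PORT B =====
-- B's state: (level, death, dying, live)
-- shared elif/else of B's loop (the element is not a live candidate)
def pvStepMiss (k level : Int) (death dying : PySem.Dict Int Int) (live num : Int) :
    Int × PySem.Dict Int Int × PySem.Dict Int Int × Int :=
  if live < k - 1 then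
    (level, death.insert num (level + 1), dying.insert (level + 1) (dying.getD (level + 1) 0 + 1), live + 1)
  else
    match dying.pop? (level + 1) with
    | some (v, dy') => (level + 1, death, dy', live - v)
    | none => (level + 1, death, dying, live - 0)

def pvStepB (k : Int) (s : Int × PySem.Dict Int Int × PySem.Dict Int Int × Int) (num : Int) :
    Int × PySem.Dict Int Int × PySem.Dict Int Int × Int :=
  match s with
  | (level, death, dying, live) =>
    match death.get? num with
    | some d =>
      if level < d then
        (level, death.insert num (d + 1),
         (dying.insert d (dying.getD d 0 - 1)).insert (d + 1)
           ((dying.insert d (dying.getD d 0 - 1)).getD (d + 1) 0 + 1), live)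
      else pvStepMiss k level death dying live num
    | none => pvStepMiss k level death dying live num

def countOccurence_alt (arr : List Int) (n : Int) (k : Int) : Int :=
  let s := arr.foldl (pvStepB k) (0, PySem.Dict.empty, PySem.Dict.empty, 0)
  let freq := arr.foldl (fun d num => d.insert num (d.getD num 0 + 1))
    (PySem.Dict.empty : PySem.Dict Int Int)
  s.2.1.items.foldl
    (fun r p => if s.1 < p.2 ∧ freq.getD p.1 0 > PySem.Int.floordiv n k then r + 1 else r) 0

-- ===== PRECONDITION & SPEC =====
def Spec_countOccurence (arr : List Int) (n : Int) (k : Int) (out : Int) : Prop := out = countOccurence_alt arr n k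
instance (arr : List Int) (n : Int) (k : Int) (out : Int) : Decidable (Spec_countOccurence arr n k out) := by unfold Spec_countOccurence; infer_instance

-- ===== CLAIM (what is proved, stated in full; the proofs are below) =====
def Claim_equal_countOccurence : Prop := ∀ (arr : List Int) (n : Int) (k : Int), Dom_countOccurence arr n k → Spec_countOccurence arr n k (countOccurence arr n k)

-- ===== LEMMAS AND PROOFS =====

theorem pv_get?_some_of_contains (d : PySem.Dict Int Int) (a : Int)
    (hc : d.contains a = true) : d.get? a = some (d.getD a 0) := by
  have hh := PySem.Dict.contains_eq_isSome_get? d a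
  rw [hc] at hh
  cases h : d.get? a with
  | none => rw [h] at hh; simp at hh
  | some v => simp [PySem.Dict.getD, h]

theorem pv_get?_none_of_not_contains (d : PySem.Dict Int Int) (a : Int)
    (hc : d.contains a = false) : d.get? a = none := by
  have hh := PySem.Dict.contains_eq_isSome_get? d a
  rw [hc] at hh
  cases h : d.get? a with
  | none => rfl
  | some v => rw [h] at hh; simp at hh

theorem pv_get?_bump (d : PySem.Dict Int Int) (a x : Int) :
    (if d.contains a then d.insert a (d.getD a 0 + 1) else d).get? x
      = (d.get? x).map (· + if x = a then 1 else 0) := by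
  by_cases hc : d.contains a
  · rw [if_pos hc, PySem.Dict.get?_insert]
    by_cases hxa : x = a
    · rw [if_pos hxa, hxa, pv_get?_some_of_contains d a hc]
      simp
    · rw [if_neg hxa]
      cases d.get? x <;> simp [hxa]
  · rw [if_neg hc]
    by_cases hxa : x = a
    · rw [hxa, pv_get?_none_of_not_contains d a (by simpa using hc)]
      simp
    · cases d.get? x <;> simp [hxa]

theorem pv_keys_bump (d : PySem.Dict Int Int) (a : Int) :
    (if d.contains a then d.insert a (d.getD a 0 + 1) else d).keys = d.keys := by
  by_cases hc : d.contains a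
  · rw [if_pos hc]; exact PySem.Dict.keys_insert_of_contains _ _ hc
  · rw [if_neg hc]

theorem pv_count (l : List Int) (d : PySem.Dict Int Int) :
    (l.foldl (fun d num => if d.contains num then d.insert num (d.getD num 0 + 1) else d) d).keys
      = d.keys ∧
    ∀ x, (l.foldl (fun d num => if d.contains num then d.insert num (d.getD num 0 + 1) else d) d).get? x
      = (d.get? x).map (· + (l.count x : Int)) := by
  induction l generalizing d with
  | nil =>
    refine ⟨rfl, fun x => ?_⟩
    cases h : d.get? x <;> simp [h]
  | cons a l ih =>
    obtain ⟨ihk, ihg⟩ := ih (if d.contains a then d.insert a (d.getD a 0 + 1) else d)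
    refine ⟨by rw [List.foldl_cons, ihk, pv_keys_bump], fun x => ?_⟩
    rw [List.foldl_cons, ihg x, pv_get?_bump, List.count_cons]
    cases h : d.get? x <;> by_cases hxa : x = a <;>
      simp [h, hxa] <;> push_cast <;> omega

theorem pv_find_filter (items : List (Int × Int)) (a x : Int) :
    (items.filter (fun p => !(p.1 == a))).find? (fun p => p.1 == x)
      = if x = a then none else items.find? (fun p => p.1 == x) := by
  induction items with
  | nil => simp
  | cons p rest ih =>
    by_cases hx : x = a
    · subst hx
      by_cases h1 : p.1 = x <;> simp_all [List.filter_cons, List.find?_cons]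
    · by_cases h1 : p.1 = a <;> by_cases h2 : p.1 = x <;>
        simp_all [List.filter_cons, List.find?_cons]

theorem pv_get?_erase {d : PySem.Dict Int Int} {a x : Int} :
    (d.erase a).get? x = if x = a then none else d.get? x := by
  obtain ⟨items⟩ := d
  simp only [PySem.Dict.erase, PySem.Dict.get?, PySem.Dict.items]
  rw [pv_find_filter]
  split_ifs <;> simp

theorem pv_countP_update {l : List Int} (hn : l.Nodup) {a : Int} (ha : a ∈ l)
    (p q : Int → Bool) (h : ∀ x ∈ l, x ≠ a → p x = q x) :
    l.countP p + (if q a then 1 else 0) = l.countP q + (if p a then 1 else 0) := by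
  have hp := List.perm_cons_erase ha
  have h1 : l.countP p = (l.erase a).countP p + (if p a then 1 else 0) := by
    simpa [List.countP_cons] using hp.countP_eq p
  have h2 : l.countP q = (l.erase a).countP q + (if q a then 1 else 0) := by
    simpa [List.countP_cons] using hp.countP_eq q
  have h3 : (l.erase a).countP p = (l.erase a).countP q := by
    apply List.countP_congr
    intro x hx
    have hxa : x ≠ a := by
      intro he; rw [he] at hx; exact (hn.not_mem_erase) hx
    rw [h x (List.mem_of_mem_erase hx) hxa]
  omega

theorem pv_reset (ks : List Int) (d : PySem.Dict Int Int)
    (hk : ∀ key ∈ ks, d.contains key = true) :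
    (ks.foldl (fun d key => d.insert key 0) d).keys = d.keys ∧
    ∀ x, (ks.foldl (fun d key => d.insert key 0) d).get? x
      = if x ∈ ks then some 0 else d.get? x := by
  induction ks generalizing d with
  | nil => simp
  | cons a ks ih =>
    have hca : d.contains a = true := hk a (by simp)
    have hk' : ∀ key ∈ ks, (d.insert a 0).contains key = true := by
      intro key hkey
      rw [PySem.Dict.contains_insert]
      simp [hk key (List.mem_cons_of_mem _ hkey)]
    obtain ⟨ihk, ihg⟩ := ih (d.insert a 0) hk'
    constructor
    · rw [List.foldl_cons, ihk, PySem.Dict.keys_insert_of_contains _ _ hca]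
    · intro x
      rw [List.foldl_cons, ihg x, PySem.Dict.get?_insert]
      by_cases hx : x ∈ ks <;> by_cases hxa : x = a <;> simp [hx, hxa]

theorem pv_find?_not_mem {l : List (Int × Int)} {key : Int}
    (h : key ∉ l.map Prod.fst) : l.find? (fun p => p.1 == key) = none := by
  apply List.find?_eq_none.2
  intro p hp
  simp only [beq_iff_eq]
  intro he
  exact h (List.mem_map.2 ⟨p, hp, he⟩)

theorem pv_map_id_not_mem {l : List (Int × Int)} {key : Int} (q : Int × Int)
    (h : key ∉ l.map Prod.fst) :
    l.map (fun p => if p.1 == key then q else p) = l := by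
  induction l with
  | nil => rfl
  | cons p rest ih =>
    simp only [List.map_cons, List.mem_cons] at h
    push_neg at h
    simp only [List.map_cons]
    rw [if_neg (by simpa using (Ne.symm h.1)), ih h.2]

theorem pv_filter_id_not_mem {l : List (Int × Int)} {key : Int}
    (h : key ∉ l.map Prod.fst) :
    l.filter (fun p => !(p.1 == key)) = l := by
  apply List.filter_eq_self.2
  intro p hp
  simp only [Bool.not_eq_eq_eq_not, Bool.not_true, beq_eq_false_iff_ne, ne_eq]
  intro he
  exact h (List.mem_map.2 ⟨p, hp, he⟩)

theorem pv_elim_items (todo done : List (Int × Int))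
    (hn : ((done ++ todo).map Prod.fst).Nodup) :
    ((todo.map Prod.fst).foldl pvElimStep ⟨done ++ todo⟩).items
      = done ++ todo.filterMap (fun p => if p.2 = 1 then none else some (p.1, p.2 - 1)) := by
  induction todo generalizing done with
  | nil => simp
  | cons hd rest ih =>
    obtain ⟨key, v⟩ := hd
    have hmaps : (done ++ (key, v) :: rest).map Prod.fst
        = done.map Prod.fst ++ key :: rest.map Prod.fst := by simp
    rw [hmaps] at hn
    have hdone : key ∉ done.map Prod.fst := by
      intro hm
      exact (List.disjoint_of_nodup_append hn) hm (by simp)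
    have hmid := List.nodup_append.1 hn
    have hcons := List.nodup_cons.1 hmid.2.1
    have hrest : key ∉ rest.map Prod.fst := hcons.1
    have hnd' : ((done ++ rest).map Prod.fst).Nodup := by
      rw [List.map_append, List.nodup_append]
      have hdisj : (done.map Prod.fst).Disjoint (rest.map Prod.fst) := by
        have h0 := List.disjoint_of_nodup_append hn
        intro x hx1 hx2
        exact h0 hx1 (List.mem_cons_of_mem _ hx2)
      exact ⟨hmid.1, hcons.2, fun a ha b hb heq => hdisj ha (heq ▸ hb)⟩
    -- evaluate one step
    have hfind : (done ++ (key, v) :: rest).find? (fun p => p.1 == key)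
        = some (key, v) := by
      rw [List.find?_append, pv_find?_not_mem hdone]
      simp
    have hget : (PySem.Dict.mk (done ++ (key, v) :: rest) : PySem.Dict Int Int).getD key 0 = v := by
      simp [PySem.Dict.getD, PySem.Dict.get?, hfind]
    have hcont : (PySem.Dict.mk (done ++ (key, v) :: rest) : PySem.Dict Int Int).contains key = true := by
      simp [PySem.Dict.contains]
    have hins : ((PySem.Dict.mk (done ++ (key, v) :: rest) : PySem.Dict Int Int).insert key (v - 1)).items
        = done ++ (key, v - 1) :: rest := by
      simp only [PySem.Dict.insert, hcont, if_pos]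
      simp only [PySem.Dict.items, List.map_append, List.map_cons]
      rw [pv_map_id_not_mem _ hdone, pv_map_id_not_mem _ hrest]
      simp
    have hget1 : (PySem.Dict.mk (done ++ (key, v - 1) :: rest) : PySem.Dict Int Int).getD key 0 = v - 1 := by
      have : (done ++ (key, v - 1) :: rest).find? (fun p => p.1 == key) = some (key, v - 1) := by
        rw [List.find?_append, pv_find?_not_mem hdone]; simp
      simp [PySem.Dict.getD, PySem.Dict.get?, this]
    have hstep : pvElimStep ⟨done ++ (key, v) :: rest⟩ key
        = if v = 1 then (⟨done ++ rest⟩ : PySem.Dict Int Int)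
          else ⟨done ++ (key, v - 1) :: rest⟩ := by
      simp only [pvElimStep]
      have hd1 : (PySem.Dict.mk (done ++ (key, v) :: rest) : PySem.Dict Int Int).insert key
          ((PySem.Dict.mk (done ++ (key, v) :: rest) : PySem.Dict Int Int).getD key 0 - 1)
          = ⟨done ++ (key, v - 1) :: rest⟩ := by
        rw [hget]; exact PySem.Dict.ext hins
      rw [hd1, hget1]
      by_cases hv : v = 1
      · rw [if_pos (by simpa using sub_eq_zero_of_eq hv), if_pos hv]
        apply PySem.Dict.ext
        simp only [PySem.Dict.erase, PySem.Dict.items, List.filter_append, List.filter_cons]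
        rw [pv_filter_id_not_mem hdone, pv_filter_id_not_mem hrest]
        simp
      · rw [if_neg (by simpa using sub_ne_zero_of_ne hv), if_neg hv]
    simp only [List.map_cons, List.foldl_cons, hstep]
    by_cases hv : v = 1
    · rw [if_pos hv, ih done hnd']
      simp [hv]
    · rw [if_neg hv]
      have hnd2 : (((done ++ [(key, v - 1)]) ++ rest).map Prod.fst).Nodup := by
        simpa [List.map_append] using hn
      have := ih (done ++ [(key, v - 1)]) hnd2
      rw [List.append_assoc] at this
      simp only [List.cons_append, List.nil_append] at this
      rw [this]
      simp [hv]

-- f applied by A's elimination loop to every (key, count) item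
def pvF : Int × Int → Option (Int × Int) := fun p => if p.2 = 1 then none else some (p.1, p.2 - 1)

theorem pv_fst_filterMap_sublist (l : List (Int × Int)) :
    ((l.filterMap pvF).map Prod.fst).Sublist (l.map Prod.fst) := by
  induction l with
  | nil => simp
  | cons p rest ih =>
    by_cases h : p.2 = 1
    · simp only [List.filterMap_cons, pvF, if_pos h, List.map_cons]
      exact ih.cons _
    · simp only [List.filterMap_cons, pvF, if_neg h, List.map_cons]
      exact ih.cons₂ _

theorem pv_find_filterMap (l : List (Int × Int)) (x : Int)
    (hn : (l.map Prod.fst).Nodup) :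
    (l.filterMap pvF).find? (fun p => p.1 == x)
      = (l.find? (fun p => p.1 == x)).bind pvF := by
  induction l with
  | nil => simp
  | cons p rest ih =>
    have hn' : (rest.map Prod.fst).Nodup := (List.nodup_cons.1 (by simpa using hn)).2
    have hp : p.1 ∉ rest.map Prod.fst := (List.nodup_cons.1 (by simpa using hn)).1
    by_cases hx : p.1 = x
    · subst hx
      have hnone : (rest.filterMap pvF).find? (fun q => q.1 == p.1) = none := by
        apply List.find?_eq_none.2
        intro q hq
        simp only [beq_iff_eq]
        intro he
        apply hp
        have : q.1 ∈ (rest.filterMap pvF).map Prod.fst := List.mem_map.2 ⟨q, hq, rfl⟩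
        exact he ▸ (pv_fst_filterMap_sublist rest).mem this
      have hfp : pvF p = if p.2 = 1 then none else some (p.1, p.2 - 1) := rfl
      by_cases hv : p.2 = 1
      · rw [List.filterMap_cons, hfp, if_pos hv, List.find?_cons]
        simp only [beq_self_eq_true, cond_true, Option.bind_some, hfp, if_pos hv, hnone]
      · rw [List.filterMap_cons, hfp, if_neg hv, List.find?_cons, List.find?_cons]
        simp only [beq_self_eq_true, cond_true, Option.bind_some, hfp, if_neg hv]
    · have hfp : pvF p = if p.2 = 1 then none else some (p.1, p.2 - 1) := rfl
      have hxb : (p.1 == x) = false := by simpa using hx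
      by_cases hv : p.2 = 1
      · rw [List.filterMap_cons, hfp, if_pos hv, ih hn', List.find?_cons]
        simp only [hxb, cond_false]
      · rw [List.filterMap_cons, hfp, if_neg hv, List.find?_cons, List.find?_cons]
        simp only [hxb, cond_false]
        rw [ih hn']

theorem pv_countP_filterMap (l : List (Int × Int)) (q : Int × Int → Bool) :
    (l.filterMap pvF).countP q
      = l.countP (fun p => !(p.2 == 1) && q (p.1, p.2 - 1)) := by
  induction l with
  | nil => simp
  | cons p rest ih =>
    have hfp : pvF p = if p.2 = 1 then none else some (p.1, p.2 - 1) := rfl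
    by_cases hv : p.2 = 1
    · rw [List.filterMap_cons, hfp, if_pos hv, ih, List.countP_cons]
      simp [hv]
    · rw [List.filterMap_cons, hfp, if_neg hv, List.countP_cons, List.countP_cons, ih]
      simp [hv]

theorem pv_length_filterMap (l : List (Int × Int)) :
    ((l.filterMap pvF).length : Int)
      = (l.length : Int) - (l.countP (fun p => p.2 == 1) : Int) := by
  induction l with
  | nil => simp
  | cons p rest ih =>
    have hle : rest.countP (fun p => p.2 == 1) ≤ rest.length := List.countP_le_length
    have hfp : pvF p = if p.2 = 1 then none else some (p.1, p.2 - 1) := rfl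
    by_cases hv : p.2 = 1
    · rw [List.filterMap_cons, hfp, if_pos hv, List.countP_cons]
      simp only [List.length_cons, ih, hv, beq_self_eq_true, if_pos]
      have : ((if (1 : Int) == 1 then 1 else 0) : Nat) = 1 := by simp
      push_cast
      omega
    · rw [List.filterMap_cons, hfp, if_neg hv, List.countP_cons]
      simp only [List.length_cons, ih]
      have hb : (p.2 == 1) = false := by simpa using hv
      simp only [hb, if_false, Bool.false_eq_true]
      push_cast
      omega

-- bridge between countP over keys (via get?) and countP over items
theorem pv_countP_keys_items (d : PySem.Dict Int Int) (hn : d.keys.Nodup) (P : Int × Int → Bool) :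
    d.keys.countP (fun x => match d.get? x with | some v => P (x, v) | none => false)
      = d.items.countP P := by
  have hkeys : d.keys = d.items.map Prod.fst := rfl
  rw [hkeys, List.countP_map]
  apply List.countP_congr
  intro p hp
  have : d.get? p.1 = some p.2 := PySem.Dict.get?_of_mem_items _ hp hn
  simp [Function.comp, this]

theorem pv_elim_items' (c : PySem.Dict Int Int) (hn : c.keys.Nodup) :
    (c.keys.foldl pvElimStep c).items = c.items.filterMap pvF := by
  have := pv_elim_items c.items [] (by simpa using hn)
  simpa using this

theorem pv_elim_get? (c : PySem.Dict Int Int) (hn : c.keys.Nodup) (x : Int) :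
    (c.keys.foldl pvElimStep c).get? x
      = (c.get? x).bind (fun v => if v = 1 then none else some (v - 1)) := by
  have hitems := pv_elim_items' c hn
  have hkeys : c.keys = c.items.map Prod.fst := rfl
  simp only [PySem.Dict.get?, hitems]
  rw [pv_find_filterMap _ _ (hkeys ▸ hn)]
  cases h : c.items.find? (fun p => p.1 == x) with
  | none => simp
  | some p =>
    have hfp : pvF p = if p.2 = 1 then none else some (p.1, p.2 - 1) := rfl
    simp only [Option.bind_some, Option.map_some, hfp]
    by_cases hv : p.2 = 1 <;> simp [hv]

theorem pv_elim_keys_nodup (c : PySem.Dict Int Int) (hn : c.keys.Nodup) :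
    (c.keys.foldl pvElimStep c).keys.Nodup := by
  have hitems := pv_elim_items' c hn
  have hk : (c.keys.foldl pvElimStep c).keys = (c.items.filterMap pvF).map Prod.fst := by
    show ((c.keys.foldl pvElimStep c).items).map Prod.fst = _
    rw [hitems]
  rw [hk]
  exact (pv_fst_filterMap_sublist _).nodup hn

theorem pv_elim_size (c : PySem.Dict Int Int) (hn : c.keys.Nodup) :
    ((c.keys.foldl pvElimStep c).size : Int)
      = (c.size : Int) - (c.keys.countP (fun x => c.get? x == some 1) : Int) := by
  have hitems := pv_elim_items' c hn
  have h1 : c.keys.countP (fun x => c.get? x == some 1)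
      = c.items.countP (fun p => p.2 == 1) := by
    have := pv_countP_keys_items c hn (fun p => p.2 == 1)
    rw [← this]
    apply List.countP_congr
    intro x hx
    have hc : c.contains x = true := (PySem.Dict.contains_iff_mem_keys _ _).2 hx
    have hh := PySem.Dict.contains_eq_isSome_get? c x
    rw [hc] at hh
    cases h : c.get? x with
    | none => rw [h] at hh; simp at hh
    | some v => simp
  rw [h1]
  simp only [PySem.Dict.size, hitems]
  exact pv_length_filterMap _

-- value of candidate x implied by B's (death, level) representation
def pvAliveVal (death : PySem.Dict Int Int) (level x : Int) : Option Int :=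
  match death.get? x with
  | some d => if level < d then some (d - level) else none
  | none => none

-- the simulation invariant between A's candidates dict and B's loop state
structure PvInv (pre : List Int) (c : PySem.Dict Int Int) (level : Int)
    (death dying : PySem.Dict Int Int) (live : Int) : Prop where
  nodupC : c.keys.Nodup
  nodupD : death.keys.Nodup
  val : ∀ x, c.get? x = pvAliveVal death level x
  size : live = (c.size : Int)
  bucket : ∀ L, level < L →
    dying.getD L 0 = ((c.keys.countP (fun x => c.get? x == some (L - level))) : Int)
  sub : ∀ x, c.contains x = true → x ∈ pre

theorem pv_contains_eq (c : PySem.Dict Int Int) (x : Int) :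
    c.contains x = (c.get? x).isSome := PySem.Dict.contains_eq_isSome_get? c x

theorem pv_getD_erase_of_ne {d : PySem.Dict Int Int} {a x : Int} (hne : x ≠ a) :
    (d.erase a).getD x 0 = d.getD x 0 := by
  simp [PySem.Dict.getD, pv_get?_erase, hne]

theorem pv_pred_match (d : PySem.Dict Int Int) (w x : Int) :
    (d.get? x == some w)
      = (match d.get? x with | some v => (v == w) | none => false) := by
  cases d.get? x <;> rfl

theorem pv_elim_bucket (c : PySem.Dict Int Int) (hn : c.keys.Nodup)
    (L level : Int) (hL : level + 1 < L) :
    (c.keys.foldl pvElimStep c).keys.countP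
        (fun x => (c.keys.foldl pvElimStep c).get? x == some (L - (level + 1)))
      = c.keys.countP (fun x => c.get? x == some (L - level)) := by
  have hn' := pv_elim_keys_nodup c hn
  have h1 : (c.keys.foldl pvElimStep c).keys.countP
        (fun x => (c.keys.foldl pvElimStep c).get? x == some (L - (level + 1)))
      = (c.keys.foldl pvElimStep c).items.countP (fun p => p.2 == L - (level + 1)) := by
    rw [← pv_countP_keys_items _ hn' (fun p => p.2 == L - (level + 1))]
    apply List.countP_congr
    intro x hx
    rw [pv_pred_match]
  have h2 : (c.keys.foldl pvElimStep c).items = c.items.filterMap pvF :=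
    pv_elim_items' c hn
  have h3 : (c.items.filterMap pvF).countP (fun p => p.2 == L - (level + 1))
      = c.items.countP (fun p => !(p.2 == 1) && ((p.2 - 1) == L - (level + 1))) := by
    exact pv_countP_filterMap _ _
  have h4 : c.items.countP (fun p => !(p.2 == 1) && ((p.2 - 1) == L - (level + 1)))
      = c.items.countP (fun p => p.2 == L - level) := by
    apply List.countP_congr
    intro p hp
    by_cases hval : p.2 = L - level
    · have ha : ¬ p.2 = 1 := by omega
      have hb : p.2 - 1 = L - (level + 1) := by omega
      simp [hval, ha, hb]
      omega
    · by_cases hb : p.2 - 1 = L - (level + 1)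
      · exact absurd (by omega : p.2 = L - level) hval
      · simp [hval, hb]
  have h5 : c.items.countP (fun p => p.2 == L - level)
      = c.keys.countP (fun x => c.get? x == some (L - level)) := by
    rw [← pv_countP_keys_items _ hn (fun p => p.2 == L - level)]
    apply List.countP_congr
    intro x hx
    rw [pv_pred_match]
  rw [h1, h2, h3, h4, h5]

theorem pv_step_miss_inv {pre : List Int} {c : PySem.Dict Int Int} {level : Int}
    {death dying : PySem.Dict Int Int} {live : Int} (k num : Int)
    (h : PvInv pre c level death dying live)
    (hcnone : c.get? num = none) :
    PvInv (pre ++ [num]) (pvStepA k c num)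
      (pvStepMiss k level death dying live num).1
      (pvStepMiss k level death dying live num).2.1
      (pvStepMiss k level death dying live num).2.2.1
      (pvStepMiss k level death dying live num).2.2.2 := by
  have hcont : c.contains num = false := by
    rw [pv_contains_eq, hcnone]; rfl
  have hnmem : num ∉ c.keys := by
    intro hm
    have ht := (PySem.Dict.contains_iff_mem_keys _ _).2 hm
    rw [ht] at hcont
    simp at hcont
  by_cases hlive : live < k - 1
  · -- fresh-candidate branch
    have hA : pvStepA k c num = c.insert num 1 := by
      rw [pvStepA, if_neg (by simp [hcont]), if_pos (by rw [← h.size]; exact hlive)]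
    have hB : pvStepMiss k level death dying live num
        = (level, death.insert num (level + 1),
           dying.insert (level + 1) (dying.getD (level + 1) 0 + 1), live + 1) := by
      rw [pvStepMiss, if_pos hlive]
    rw [hA, hB]
    dsimp only
    refine ⟨?_, ?_, ?_, ?_, ?_, ?_⟩
    · exact PySem.Dict.nodup_keys_insert _ _ _ h.nodupC
    · exact PySem.Dict.nodup_keys_insert _ _ _ h.nodupD
    · intro x
      by_cases hx : x = num
      · subst hx
        have h1 : level < level + 1 := by omega
        simp [pvAliveVal, PySem.Dict.get?_insert, h1]
      · rw [PySem.Dict.get?_insert, if_neg hx, h.val x, pvAliveVal, pvAliveVal,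
            PySem.Dict.get?_insert, if_neg hx]
    · rw [PySem.Dict.size_insert, if_neg (by simp [hcont])]
      have hs := h.size
      push_cast
      omega
    · intro L hL
      have hkeys : (c.insert num 1).keys = c.keys ++ [num] :=
        PySem.Dict.keys_insert_of_not_contains _ _ hcont
      rw [PySem.Dict.getD_insert, hkeys, List.countP_append]
      have hcongr : c.keys.countP (fun x => (c.insert num 1).get? x == some (L - level))
          = c.keys.countP (fun x => c.get? x == some (L - level)) := by
        apply List.countP_congr
        intro x hx
        have hxn : x ≠ num := fun he => hnmem (he ▸ hx)
        rw [PySem.Dict.get?_insert, if_neg hxn]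
      have hsing : [num].countP (fun x => (c.insert num 1).get? x == some (L - level))
          = if L = level + 1 then 1 else 0 := by
        have hg : (c.insert num 1).get? num = some 1 := by
          rw [PySem.Dict.get?_insert, if_pos rfl]
        simp only [List.countP_cons, List.countP_nil, hg]
        by_cases hLe : L = level + 1
        · rw [hLe]
          simp [show level + 1 - level = (1:Int) from by omega]
        · have hb : ((some (1:Int) == some (L - level))) = false := by
            simp only [beq_eq_false_iff_ne, ne_eq, Option.some.injEq]
            omega
          simp [hb, hLe]
      rw [hcongr, hsing]
      have hb := h.bucket L hL
      by_cases hLe : L = level + 1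
      · subst hLe
        rw [if_pos rfl, if_pos rfl, hb]
        push_cast
        omega
      · rw [if_neg hLe, if_neg hLe, hb]
        push_cast
        omega
    · intro x hx
      simp only [PySem.Dict.contains_insert, Bool.or_eq_true, beq_iff_eq] at hx
      rcases hx with h1 | h1
      · subst h1; simp
      · exact List.mem_append_left _ (h.sub x h1)
  · -- elimination branch
    have hA : pvStepA k c num = c.keys.foldl pvElimStep c := by
      rw [pvStepA, if_neg (by simp [hcont]), if_neg (by rw [← h.size]; exact hlive)]
    have hB1 : (pvStepMiss k level death dying live num).1 = level + 1 ∧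
        (pvStepMiss k level death dying live num).2.1 = death ∧
        (pvStepMiss k level death dying live num).2.2.2
          = live - dying.getD (level + 1) 0 ∧
        (∀ L, L ≠ level + 1 →
          (pvStepMiss k level death dying live num).2.2.1.getD L 0 = dying.getD L 0) := by
      rw [pvStepMiss, if_neg hlive]
      cases hg : dying.get? (level + 1) with
      | none =>
        simp only [PySem.Dict.pop?, hg, Option.map_none]
        refine ⟨by trivial, by trivial, ?_, by intro L hL; trivial⟩
        simp [PySem.Dict.getD, hg]
      | some v =>
        simp only [PySem.Dict.pop?, hg, Option.map_some]
        refine ⟨by trivial, by trivial, ?_, by intro L hL; exact pv_getD_erase_of_ne hL⟩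
        simp [PySem.Dict.getD, hg]
    obtain ⟨e1, e2, e3, e4⟩ := hB1
    rw [hA, e1, e2, e3]
    have hone : (level + 1 - level : Int) = 1 := by omega
    have hb1 := h.bucket (level + 1) (by omega)
    rw [hone] at hb1
    refine ⟨?_, ?_, ?_, ?_, ?_, ?_⟩
    · exact pv_elim_keys_nodup c h.nodupC
    · exact h.nodupD
    · intro x
      rw [pv_elim_get? c h.nodupC, h.val x, pvAliveVal, pvAliveVal]
      cases hdx : death.get? x with
      | none => simp
      | some dd =>
        dsimp only
        by_cases h1 : level < dd
        · rw [if_pos h1]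
          simp only [Option.bind_some]
          by_cases h2 : dd - level = 1
          · rw [if_pos h2, if_neg (by omega)]
          · rw [if_neg h2, if_pos (by omega)]
            congr 1
            omega
        · rw [if_neg h1]
          simp only [Option.bind_none]
          rw [if_neg (by omega)]
    · rw [pv_elim_size c h.nodupC, ← hb1]
      have hs := h.size
      omega
    · intro L hL
      rw [e4 L (by omega)]
      have hb := h.bucket L (by omega)
      rw [hb, ← pv_elim_bucket c h.nodupC L level hL]
    · intro x hx
      have hne : (c.keys.foldl pvElimStep c).get? x ≠ none := by
        rw [pv_contains_eq] at hx
        intro he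
        rw [he] at hx
        simp at hx
      rw [pv_elim_get? c h.nodupC] at hne
      apply List.mem_append_left
      apply h.sub
      rw [pv_contains_eq]
      cases hcx : c.get? x with
      | none => rw [hcx] at hne; simp at hne
      | some v => rfl

theorem pv_step_inv {pre : List Int} {c : PySem.Dict Int Int} {level : Int}
    {death dying : PySem.Dict Int Int} {live : Int} (k num : Int)
    (h : PvInv pre c level death dying live) :
    PvInv (pre ++ [num]) (pvStepA k c num)
      (pvStepB k (level, death, dying, live) num).1
      (pvStepB k (level, death, dying, live) num).2.1
      (pvStepB k (level, death, dying, live) num).2.2.1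
      (pvStepB k (level, death, dying, live) num).2.2.2 := by
  have hval := h.val num
  rcases hd : death.get? num with _ | d
  case some =>
    by_cases hlt : level < d
    · -- HIT branch
      have hcnum : c.get? num = some (d - level) := by
        rw [hval, pvAliveVal, hd]; simp [hlt]
      have hcont : c.contains num = true := by
        rw [pv_contains_eq, hcnum]; rfl
      have hA : pvStepA k c num = c.insert num (d - level + 1) := by
        rw [pvStepA, if_pos hcont]
        have : c.getD num 0 = d - level := by simp [PySem.Dict.getD, hcnum]
        rw [this]
      have hB : pvStepB k (level, death, dying, live) num
          = (level, death.insert num (d + 1),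
             (dying.insert d (dying.getD d 0 - 1)).insert (d + 1)
               ((dying.insert d (dying.getD d 0 - 1)).getD (d + 1) 0 + 1), live) := by
        rw [pvStepB, hd]; simp [hlt]
      rw [hA, hB]
      dsimp only
      refine ⟨?_, ?_, ?_, ?_, ?_, ?_⟩
      · exact PySem.Dict.nodup_keys_insert _ _ _ h.nodupC
      · exact PySem.Dict.nodup_keys_insert _ _ _ h.nodupD
      · intro x
        by_cases hx : x = num
        · subst hx
          have h1 : level < d + 1 := by omega
          simp [pvAliveVal, PySem.Dict.get?_insert, h1]
          omega
        · rw [PySem.Dict.get?_insert, if_neg hx, h.val x, pvAliveVal, pvAliveVal,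
              PySem.Dict.get?_insert, if_neg hx]
      · rw [PySem.Dict.size_insert, if_pos hcont]; exact h.size
      · intro L hL
        have hkeys : (c.insert num (d - level + 1)).keys = c.keys :=
          PySem.Dict.keys_insert_of_contains _ _ hcont
        have hmem : num ∈ c.keys := (PySem.Dict.contains_iff_mem_keys _ _).1 hcont
        have hpnum : ((c.insert num (d - level + 1)).get? num == some (L - level))
            = decide (L = d + 1) := by
          rw [PySem.Dict.get?_insert, if_pos rfl, Bool.eq_iff_iff]
          simp; omega
        have hqnum : (c.get? num == some (L - level)) = decide (L = d) := by
          rw [hcnum, Bool.eq_iff_iff]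
          simp; omega
        have hupd := pv_countP_update h.nodupC hmem
          (fun x => (c.insert num (d - level + 1)).get? x == some (L - level))
          (fun x => c.get? x == some (L - level))
          (by intro x hx hxn
              show ((c.insert num (d - level + 1)).get? x == _) = _
              rw [PySem.Dict.get?_insert, if_neg hxn])
        simp only [hpnum, hqnum, decide_eq_true_eq] at hupd
        push_cast at hupd
        rw [PySem.Dict.getD_insert, PySem.Dict.getD_insert, PySem.Dict.getD_insert, hkeys]
        have hb1 := h.bucket L hL
        have hbd : dying.getD d 0
            = (c.keys.countP (fun x => c.get? x == some (d - level)) : Int) :=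
          h.bucket d hlt
        have hbd1 : dying.getD (d + 1) 0
            = (c.keys.countP (fun x => c.get? x == some (d + 1 - level)) : Int) :=
          h.bucket (d + 1) (by omega)
        have hf : ¬ ((d : Int) + 1 = d) := by omega
        by_cases hL1 : L = d + 1
        · rw [hL1] at hupd ⊢
          rw [if_pos rfl, if_neg hf, hbd1]
          rw [if_neg hf, if_pos rfl] at hupd
          omega
        · by_cases hL2 : L = d
          · rw [hL2] at hupd ⊢
            rw [if_neg (show ¬ ((d:Int) = d + 1) by omega), if_pos rfl, hbd]
            rw [if_pos rfl, if_neg (show ¬ ((d:Int) = d + 1) by omega)] at hupd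
            omega
          · rw [if_neg hL1, if_neg hL2, hb1]
            rw [if_neg hL2, if_neg hL1] at hupd
            omega
      · intro x hx
        simp only [PySem.Dict.contains_insert, Bool.or_eq_true, beq_iff_eq] at hx
        rcases hx with h1 | h1
        · subst h1; simp
        · exact List.mem_append_left _ (h.sub x h1)
    · -- stale death entry (dead candidate): behaves like the none-case
      have hcnone : c.get? num = none := by
        rw [hval, pvAliveVal, hd]
        dsimp only
        rw [if_neg hlt]
      have hB : pvStepB k (level, death, dying, live) num
          = pvStepMiss k level death dying live num := by
        rw [pvStepB, hd]
        dsimp only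
        rw [if_neg hlt]
      rw [hB]
      exact pv_step_miss_inv k num h hcnone
  case none =>
    have hcnone : c.get? num = none := by
      rw [hval, pvAliveVal, hd]
    have hB : pvStepB k (level, death, dying, live) num
        = pvStepMiss k level death dying live num := by
      rw [pvStepB, hd]
    rw [hB]
    exact pv_step_miss_inv k num h hcnone

theorem pv_fold_inv_aux (k : Int) (l : List Int) :
    ∀ (pre : List Int) (c : PySem.Dict Int Int) (level : Int)
      (death dying : PySem.Dict Int Int) (live : Int),
      PvInv pre c level death dying live →
      PvInv (pre ++ l) (l.foldl (pvStepA k) c)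
        (l.foldl (pvStepB k) (level, death, dying, live)).1
        (l.foldl (pvStepB k) (level, death, dying, live)).2.1
        (l.foldl (pvStepB k) (level, death, dying, live)).2.2.1
        (l.foldl (pvStepB k) (level, death, dying, live)).2.2.2 := by
  induction l with
  | nil => intro pre c level death dying live h; simpa using h
  | cons a l ih =>
    intro pre c level death dying live h
    have hstep := pv_step_inv k a h
    rcases hs : pvStepB k (level, death, dying, live) a with ⟨t', d', dy', lv'⟩
    rw [hs] at hstep
    have := ih (pre ++ [a]) (pvStepA k c a) t' d' dy' lv' hstep
    simpa [hs, List.append_assoc] using this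

theorem pv_fold_inv (arr : List Int) (k : Int) :
    PvInv arr (arr.foldl (pvStepA k) PySem.Dict.empty)
      (arr.foldl (pvStepB k) (0, PySem.Dict.empty, PySem.Dict.empty, 0)).1
      (arr.foldl (pvStepB k) (0, PySem.Dict.empty, PySem.Dict.empty, 0)).2.1
      (arr.foldl (pvStepB k) (0, PySem.Dict.empty, PySem.Dict.empty, 0)).2.2.1
      (arr.foldl (pvStepB k) (0, PySem.Dict.empty, PySem.Dict.empty, 0)).2.2.2 := by
  have h0 : PvInv [] PySem.Dict.empty 0 PySem.Dict.empty PySem.Dict.empty 0 := by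
    refine ⟨PySem.Dict.nodup_keys_empty, PySem.Dict.nodup_keys_empty, ?_, ?_, ?_, ?_⟩
    · intro x; simp [pvAliveVal, PySem.Dict.get?_empty]
    · simp [PySem.Dict.size_empty]
    · intro L hL; simp [PySem.Dict.getD_empty, PySem.Dict.keys_empty]
    · intro x hx; rw [PySem.Dict.contains_empty] at hx; cases hx
  simpa using pv_fold_inv_aux k arr [] PySem.Dict.empty 0 PySem.Dict.empty PySem.Dict.empty 0 h0

theorem pv_fold_countP {α : Type} (l : List α) (P : α → Prop) [DecidablePred P] (r0 : Int) :
    l.foldl (fun r x => if P x then r + 1 else r) r0 = r0 + (l.countP (fun x => decide (P x)) : Int) := by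
  induction l generalizing r0 with
  | nil => simp
  | cons a l ih =>
    simp only [List.foldl_cons, List.countP_cons, ih]
    by_cases h : P a <;> simp [h] <;> push_cast <;> ring

theorem pv_mem_keys_of_get?_eq_some {d : PySem.Dict Int Int} {x v : Int}
    (h : d.get? x = some v) : x ∈ d.keys := by
  by_contra hm
  rw [(PySem.Dict.get?_eq_none_iff_not_mem_keys _ _).2 hm] at h
  cases h

theorem pv_main (arr : List Int) (n k : Int) :
    countOccurence arr n k = countOccurence_alt arr n k := by
  have hinv := pv_fold_inv arr k
  set c1 := arr.foldl (pvStepA k) PySem.Dict.empty with hc1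
  set s := arr.foldl (pvStepB k) (0, PySem.Dict.empty, PySem.Dict.empty, 0) with hs
  set flo := PySem.Int.floordiv n k with hflo
  -- A side
  have hk1 : ∀ key ∈ c1.keys, c1.contains key = true :=
    fun key hm => (PySem.Dict.contains_iff_mem_keys _ _).2 hm
  obtain ⟨hrk, hrg⟩ := pv_reset c1.keys c1 hk1
  set c2 := c1.keys.foldl (fun d key => d.insert key 0) c1 with hc2
  obtain ⟨hck, hcg⟩ := pv_count arr c2
  set c3 := arr.foldl
    (fun d num => if d.contains num then d.insert num (d.getD num 0 + 1) else d) c2 with hc3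
  have hAkeys : c3.keys = c1.keys := by rw [hck, hrk]
  have hA : countOccurence arr n k
      = (c3.keys.countP (fun key => decide (c3.getD key 0 > flo)) : Int) := by
    show c3.keys.foldl (fun r key => if c3.getD key 0 > flo then r + 1 else r) 0 = _
    rw [pv_fold_countP c3.keys (fun key => c3.getD key 0 > flo) 0]
    simp
  have hAget : ∀ x ∈ c1.keys, c3.getD x 0 = (arr.count x : Int) := by
    intro x hx
    have h2 : c2.get? x = some 0 := by rw [hrg x, if_pos hx]
    have h3 : c3.get? x = some ((arr.count x : Int)) := by
      rw [hcg x, h2]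
      simp
    simp [PySem.Dict.getD, h3]
  have hA2 : countOccurence arr n k
      = (c1.keys.countP (fun x => decide ((arr.count x : Int) > flo)) : Int) := by
    rw [hA, hAkeys]
    congr 1
    apply List.countP_congr
    intro x hx
    rw [hAget x hx]
  -- B side
  have hfreq : arr.foldl (fun d num => d.insert num (d.getD num 0 + 1))
      (PySem.Dict.empty : PySem.Dict Int Int) = PySem.Dict.counter arr :=
    PySem.Dict.foldl_insert_getD_add_one_eq_counter arr
  have hB : countOccurence_alt arr n k
      = (s.2.1.items.countP (fun p =>
          decide (s.1 < p.2 ∧ (PySem.Dict.counter arr).getD p.1 0 > flo)) : Int) := by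
    show s.2.1.items.foldl (fun r p =>
        if s.1 < p.2 ∧ (arr.foldl (fun d num => d.insert num (d.getD num 0 + 1))
          (PySem.Dict.empty : PySem.Dict Int Int)).getD p.1 0 > flo then r + 1 else r) 0 = _
    rw [hfreq]
    rw [pv_fold_countP s.2.1.items
      (fun p => s.1 < p.2 ∧ (PySem.Dict.counter arr).getD p.1 0 > flo) 0]
    simp
  have hB2 : countOccurence_alt arr n k
      = (s.2.1.items.countP (fun p =>
          decide (s.1 < p.2) && decide ((arr.count p.1 : Int) > flo)) : Int) := by
    rw [hB]
    congr 1
    apply List.countP_congr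
    intro p hp
    rw [PySem.Dict.getD_counter]
    simp
  -- bridge: items countP → keys countP → perm with c1.keys
  have hitems : s.2.1.items = s.2.1.keys.map (fun x => (x, s.2.1.getD x 0)) :=
    PySem.Dict.items_eq_map_keys _ hinv.nodupD 0
  have hB3 : countOccurence_alt arr n k
      = (s.2.1.keys.countP (fun x =>
          decide ((arr.count x : Int) > flo) && decide (s.1 < s.2.1.getD x 0)) : Int) := by
    rw [hB2, hitems, List.countP_map]
    congr 1
    apply List.countP_congr
    intro x hx
    simp only [Function.comp]
    rw [Bool.and_comm]
  have hfilter : s.2.1.keys.countP (fun x =>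
        decide ((arr.count x : Int) > flo) && decide (s.1 < s.2.1.getD x 0))
      = (s.2.1.keys.filter (fun x => decide (s.1 < s.2.1.getD x 0))).countP
          (fun x => decide ((arr.count x : Int) > flo)) := by
    rw [List.countP_filter]
  have hperm : (s.2.1.keys.filter (fun x => decide (s.1 < s.2.1.getD x 0))).Perm c1.keys := by
    apply (List.perm_ext_iff_of_nodup (hinv.nodupD.filter _) hinv.nodupC).mpr
    intro x
    rw [List.mem_filter]
    constructor
    · rintro ⟨hmem, halive⟩
      have hgd : s.2.1.get? x = some (s.2.1.getD x 0) :=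
        pv_get?_some_of_contains _ _ ((PySem.Dict.contains_iff_mem_keys _ _).2 hmem)
      have hlt : s.1 < s.2.1.getD x 0 := by simpa using halive
      have hc : c1.get? x = some (s.2.1.getD x 0 - s.1) := by
        rw [hinv.val x, pvAliveVal, hgd]
        dsimp only
        rw [if_pos hlt]
      exact pv_mem_keys_of_get?_eq_some hc
    · intro hmem
      have hcont : c1.contains x = true := (PySem.Dict.contains_iff_mem_keys _ _).2 hmem
      have hval := hinv.val x
      rw [pv_contains_eq, hval, pvAliveVal] at hcont
      cases hdx : s.2.1.get? x with
      | none => rw [hdx] at hcont; simp at hcont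
      | some dd =>
        rw [hdx] at hcont
        dsimp only at hcont
        by_cases hlt : s.1 < dd
        · refine ⟨pv_mem_keys_of_get?_eq_some hdx, ?_⟩
          have : s.2.1.getD x 0 = dd := by simp [PySem.Dict.getD, hdx]
          simp [this, hlt]
        · rw [if_neg hlt] at hcont; simp at hcont
  rw [hA2, hB3, hfilter, hperm.countP_eq]

-- ===== VERDICT (by name: the statement is the Claim_ definition above) =====
theorem countOccurence_spec : Claim_equal_countOccurence := by
  intro arr n k _
  unfold Spec_countOccurence
  exact pv_main arr n k
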